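-- pv_equiv track=rewrite | github.com/VerbalAid/Medical_Justifications_Human_vs_LLM_-Corpus_Linguistics- | pipeline/rf2.py | max_depth_from_root_rf2
-- ===== SOURCE A (Python) =====
-- RF2_ROOT_CONCEPT_ID = "138875005"
--
-- def max_depth_from_root_rf2(
--     concept_id: str,
--     child_to_parents: dict[str, list[str]],
--     root_id: str = RF2_ROOT_CONCEPT_ID,
--     memo: dict[str, int | None] | None = None,
--     stack: set[str] | None = None,
-- ) -> int | None:
--     if memo is None:
--         memo = {}
--     if stack is None:
--         stack = set()
--     if concept_id == root_id:
--         return 0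
--     if concept_id in memo:
--         return memo[concept_id]
--     if concept_id in stack:
--         memo[concept_id] = None
--         return None
--     pars = child_to_parents.get(concept_id)
--     if not pars:
--         memo[concept_id] = None
--         return None
--     stack.add(concept_id)
--     best: int | None = None
--     for p in pars:
--         d = max_depth_from_root_rf2(p, child_to_parents, root_id, memo, stack)
--         if d is not None:
--             cand = 1 + d
--             best = cand if best is None else max(best, cand)
--     stack.discard(concept_id)
--     memo[concept_id] = best
--     return best
-- ===== SOURCE B (Python) =====
-- RF2_ROOT_CONCEPT_ID = "138875005"
--
-- def max_depth_from_root_rf2(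
--     concept_id,
--     child_to_parents,
--     root_id=RF2_ROOT_CONCEPT_ID,
--     memo=None,
--     stack=None,
-- ):
--     # Iterative explicit-frame DFS instead of recursion; same memo/stack mutations.
--     if memo is None:
--         memo = {}
--     if stack is None:
--         stack = set()
--
--     def quick(c):
--         # Resolve c without expanding it; returns (True, value) or (False, parents).
--         if c == root_id:
--             return True, 0
--         if c in memo:
--             return True, memo[c]
--         if c in stack:
--             memo[c] = None
--             return True, None
--         pars = child_to_parents.get(c)
--         if not pars:
--             memo[c] = None
--             return True, None
--         return False, pars
--
--     done, v = quick(concept_id)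
--     if done:
--         return v
--     stack.add(concept_id)
--     frames = [(concept_id, list(v), None)]
--     while True:
--         node, pending, best = frames[-1]
--         if pending:
--             p = pending[0]
--             done, v = quick(p)
--             if done:
--                 if v is not None:
--                     cand = 1 + v
--                     best = cand if best is None else max(best, cand)
--                 frames[-1] = (node, pending[1:], best)
--             else:
--                 stack.add(p)
--                 frames.append((p, list(v), None))
--         else:
--             frames.pop()
--             stack.discard(node)
--             memo[node] = best
--             if not frames:
--                 return best
-- ===== Notes on version B (the rewrite author's own statement) =====
-- stated objective: alternative
-- what changed: A's recursive memoized DFS is replaced by an iterative machine over an explicit frame stack (node, pending parents, best-so-far) with the same memo dict and visiting set; a finished child is picked up by its parent through a memo re-query instead of a call return, so there is no recursion at all.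
import Mathlib
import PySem

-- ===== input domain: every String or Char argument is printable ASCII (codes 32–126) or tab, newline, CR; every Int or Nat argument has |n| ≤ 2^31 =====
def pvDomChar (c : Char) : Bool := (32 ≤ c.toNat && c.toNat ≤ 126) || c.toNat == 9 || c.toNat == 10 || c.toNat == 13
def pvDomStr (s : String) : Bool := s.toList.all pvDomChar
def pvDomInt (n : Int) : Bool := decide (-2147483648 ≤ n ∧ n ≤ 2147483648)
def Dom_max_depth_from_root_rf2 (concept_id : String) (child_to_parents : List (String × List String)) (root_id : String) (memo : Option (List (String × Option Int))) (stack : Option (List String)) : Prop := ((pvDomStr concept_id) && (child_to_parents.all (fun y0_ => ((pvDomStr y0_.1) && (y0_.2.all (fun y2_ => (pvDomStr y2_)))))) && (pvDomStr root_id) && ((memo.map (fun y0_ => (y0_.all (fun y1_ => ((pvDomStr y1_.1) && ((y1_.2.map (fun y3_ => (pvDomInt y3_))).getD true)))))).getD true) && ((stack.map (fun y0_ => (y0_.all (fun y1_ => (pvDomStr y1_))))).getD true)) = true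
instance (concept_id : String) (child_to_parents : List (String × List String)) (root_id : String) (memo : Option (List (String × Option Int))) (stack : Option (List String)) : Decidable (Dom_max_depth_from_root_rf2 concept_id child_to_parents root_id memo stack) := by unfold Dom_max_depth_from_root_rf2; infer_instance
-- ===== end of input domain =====

-- B replaces A's recursive memoized DFS by an iterative explicit-frame DFS (same memo dict and
-- visiting set, same mutations on the caller's memo/stack); equivalence proved for the RETURN value.

-- `best = cand if best is None else max(best, cand)` guarded by `if d is not None` (shared loop body shape)
def pvUpd (best d : Option Int) : Option Int :=
  match d with
  | none => best
  | some dv => some (match best with | none => 1 + dv | some bv => max bv (1 + dv))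

-- measure helpers for termination of the B-side machine
def pvSumLen (frames : List (String × List String × Option Int)) : Nat :=
  (frames.map (fun f => f.2.1.length + 1)).sum

def pvKeysLeft (ctp : List (String × List String)) (memo : PySem.Dict String (Option Int)) (vis : List String) : Nat :=
  ((ctp.map Prod.fst).toFinset.filter (fun k => PySem.Dict.get? memo k = none ∧ k ∉ vis)).card

theorem pvKeysLeft_le (ctp : List (String × List String)) (memo memo' : PySem.Dict String (Option Int)) (vis vis' : List String)
    (h : ∀ k, PySem.Dict.get? memo' k = none → k ∉ vis' → PySem.Dict.get? memo k = none ∧ k ∉ vis) :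
    pvKeysLeft ctp memo' vis' ≤ pvKeysLeft ctp memo vis := by
  unfold pvKeysLeft
  apply Finset.card_le_card
  intro k hk
  rw [Finset.mem_filter] at hk ⊢
  exact ⟨hk.1, h k hk.2.1 hk.2.2⟩

theorem pvKeysLeft_insert_le (ctp : List (String × List String)) (memo : PySem.Dict String (Option Int)) (vis : List String) (x : String) (v : Option Int) :
    pvKeysLeft ctp (memo.insert x v) vis ≤ pvKeysLeft ctp memo vis := by
  refine pvKeysLeft_le ctp memo _ vis vis (fun k hk hv => ⟨?_, hv⟩)
  rw [PySem.Dict.get?_insert] at hk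
  split at hk
  · exact absurd hk (by simp)
  · exact hk

theorem pvKeysLeft_pop_le (ctp : List (String × List String)) (memo : PySem.Dict String (Option Int)) (vis : List String) (x : String) (v : Option Int) :
    pvKeysLeft ctp (memo.insert x v) (PySem.Set.discard vis x) ≤ pvKeysLeft ctp memo vis := by
  refine pvKeysLeft_le ctp memo _ vis _ (fun k hk hv => ?_)
  rw [PySem.Dict.get?_insert] at hk
  split at hk
  · exact absurd hk (by simp)
  · next hne =>
    refine ⟨hk, fun hmem => hv ?_⟩
    exact (PySem.Set.mem_discard vis x k).2 ⟨hmem, hne⟩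

theorem pvKeysLeft_add_lt (ctp : List (String × List String)) (memo : PySem.Dict String (Option Int)) (vis : List String) (p : String)
    (hkey : p ∈ ctp.map Prod.fst) (hm : PySem.Dict.get? memo p = none) (hv : p ∉ vis) :
    pvKeysLeft ctp memo (PySem.Set.add vis p) < pvKeysLeft ctp memo vis := by
  unfold pvKeysLeft
  apply Finset.card_lt_card
  constructor
  · intro k hk
    rw [Finset.mem_filter] at hk ⊢
    refine ⟨hk.1, hk.2.1, fun hmem => hk.2.2 ?_⟩
    exact (PySem.Set.mem_add vis p k).2 (Or.inl hmem)
  · intro hsup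
    have hp : p ∈ (ctp.map Prod.fst).toFinset.filter (fun k => PySem.Dict.get? memo k = none ∧ k ∉ vis) := by
      rw [Finset.mem_filter]
      exact ⟨List.mem_toFinset.2 hkey, hm, hv⟩
    have := Finset.mem_filter.1 (hsup hp)
    exact this.2.2 ((PySem.Set.mem_add vis p p).2 (Or.inr rfl))

-- ===== PORT A =====  (recursive DFS; fuel is only a totality guard, never exhausted: the
-- visiting set bounds the recursion depth by the number of distinct keys of child_to_parents)
mutual
def pvGoA (ctp : List (String × List String)) (root : String) (fuel : Nat) (c : String)
    (memo : PySem.Dict String (Option Int)) (vis : List String) :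
    Option Int × PySem.Dict String (Option Int) × List String :=
  match fuel with
  | 0 => (none, memo, vis)
  | f + 1 =>
    if c = root then (some 0, memo, vis)
    else
      match PySem.Dict.get? memo c with
      | some v => (v, memo, vis)
      | none =>
        if PySem.Set.contains vis c then (none, memo.insert c none, vis)
        else
          match PySem.Dict.get? (PySem.Dict.mk ctp) c with
          | none => (none, memo.insert c none, vis)
          | some [] => (none, memo.insert c none, vis)
          | some (p :: ps) =>
            let st := pvFoldA ctp root f (p :: ps) (none, memo, PySem.Set.add vis c)
            (st.1, st.2.1.insert c st.1, PySem.Set.discard st.2.2 c)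
termination_by (fuel, 0)

-- A's `for p in pars` loop over the accumulator (best, memo, stack)
def pvFoldA (ctp : List (String × List String)) (root : String) (f : Nat) (ps : List String)
    (acc : Option Int × PySem.Dict String (Option Int) × List String) :
    Option Int × PySem.Dict String (Option Int) × List String :=
  match ps with
  | [] => acc
  | q :: qs =>
    let r := pvGoA ctp root f q acc.2.1 acc.2.2
    pvFoldA ctp root f qs (pvUpd acc.1 r.1, r.2.1, r.2.2)
termination_by (f, ps.length + 1)
end

def max_depth_from_root_rf2 (concept_id : String) (child_to_parents : List (String × List String)) (root_id : String) (memo : Option (List (String × Option Int))) (stack : Option (List String)) : Option Int :=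
  let memo0 : PySem.Dict String (Option Int) := PySem.Dict.mk (memo.getD [])
  let vis0 : List String := stack.getD []
  (pvGoA child_to_parents root_id (child_to_parents.length + 2) concept_id memo0 vis0).1

-- ===== PORT B =====  (iterative machine over an explicit frame stack (node, pending parents, best))
def pvRunB (ctp : List (String × List String)) (root : String)
    (frames : List (String × List String × Option Int))
    (memo : PySem.Dict String (Option Int)) (vis : List String) : Option Int :=
  match frames with
  | [] => none
  | (node, pending, best) :: rest =>
    match pending with
    | [] =>
      match rest with
      | [] => best
      | r :: rs => pvRunB ctp root (r :: rs) (memo.insert node best) (PySem.Set.discard vis node)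
    | p :: restP =>
      if p = root then
        pvRunB ctp root ((node, restP, pvUpd best (some 0)) :: rest) memo vis
      else
        match hmp : PySem.Dict.get? memo p with
        | some v => pvRunB ctp root ((node, restP, pvUpd best v) :: rest) memo vis
        | none =>
          if PySem.Set.contains vis p then
            pvRunB ctp root ((node, restP, best) :: rest) (memo.insert p none) vis
          else
            match hcp : PySem.Dict.get? (PySem.Dict.mk ctp) p with
            | none => pvRunB ctp root ((node, restP, best) :: rest) (memo.insert p none) vis
            | some [] => pvRunB ctp root ((node, restP, best) :: rest) (memo.insert p none) vis
            | some (q :: qs) =>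
              pvRunB ctp root ((p, q :: qs, none) :: (node, p :: restP, best) :: rest) memo (PySem.Set.add vis p)
termination_by (pvKeysLeft ctp memo vis, pvSumLen frames)
decreasing_by
  · have h1 := pvKeysLeft_pop_le ctp memo vis node best
    rcases Nat.lt_or_ge (pvKeysLeft ctp (memo.insert node best) (PySem.Set.discard vis node)) (pvKeysLeft ctp memo vis) with h | h
    · exact Prod.Lex.left _ _ h
    · have : pvKeysLeft ctp (memo.insert node best) (PySem.Set.discard vis node) = pvKeysLeft ctp memo vis := le_antisymm h1 h
      rw [this]; exact Prod.Lex.right _ (by simp [pvSumLen])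
  · exact Prod.Lex.right _ (by simp [pvSumLen])
  · exact Prod.Lex.right _ (by simp [pvSumLen])
  · have h1 := pvKeysLeft_insert_le ctp memo vis p none
    rcases Nat.lt_or_ge (pvKeysLeft ctp (memo.insert p none) vis) (pvKeysLeft ctp memo vis) with h | h
    · exact Prod.Lex.left _ _ h
    · have : pvKeysLeft ctp (memo.insert p none) vis = pvKeysLeft ctp memo vis := le_antisymm h1 h
      rw [this]; exact Prod.Lex.right _ (by simp [pvSumLen])
  · have h1 := pvKeysLeft_insert_le ctp memo vis p none
    rcases Nat.lt_or_ge (pvKeysLeft ctp (memo.insert p none) vis) (pvKeysLeft ctp memo vis) with h | h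
    · exact Prod.Lex.left _ _ h
    · have : pvKeysLeft ctp (memo.insert p none) vis = pvKeysLeft ctp memo vis := le_antisymm h1 h
      rw [this]; exact Prod.Lex.right _ (by simp [pvSumLen])
  · have h1 := pvKeysLeft_insert_le ctp memo vis p none
    rcases Nat.lt_or_ge (pvKeysLeft ctp (memo.insert p none) vis) (pvKeysLeft ctp memo vis) with h | h
    · exact Prod.Lex.left _ _ h
    · have : pvKeysLeft ctp (memo.insert p none) vis = pvKeysLeft ctp memo vis := le_antisymm h1 h
      rw [this]; exact Prod.Lex.right _ (by simp [pvSumLen])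
  · apply Prod.Lex.left
    apply pvKeysLeft_add_lt ctp memo vis p
    · have : ¬ PySem.Dict.get? (PySem.Dict.mk ctp) p = none := by simp_all
      rw [PySem.Dict.get?_eq_none_iff_not_mem_keys] at this
      simpa [PySem.Dict.keys] using not_not.1 this
    · assumption
    · intro hmem
      simp_all

def max_depth_from_root_rf2_alt (concept_id : String) (child_to_parents : List (String × List String)) (root_id : String) (memo : Option (List (String × Option Int))) (stack : Option (List String)) : Option Int :=
  let memo0 : PySem.Dict String (Option Int) := PySem.Dict.mk (memo.getD [])
  let vis0 : List String := stack.getD []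
  -- quick(concept_id)
  if concept_id = root_id then some 0
  else
    match PySem.Dict.get? memo0 concept_id with
    | some v => v
    | none =>
      if PySem.Set.contains vis0 concept_id then none
      else
        match PySem.Dict.get? (PySem.Dict.mk child_to_parents) concept_id with
        | none => none
        | some [] => none
        | some (p :: ps) =>
          pvRunB child_to_parents root_id [(concept_id, p :: ps, none)] memo0 (PySem.Set.add vis0 concept_id)

-- ===== PRECONDITION & SPEC =====
def Spec_max_depth_from_root_rf2 (concept_id : String) (child_to_parents : List (String × List String)) (root_id : String) (memo : Option (List (String × Option Int))) (stack : Option (List String)) (out : Option Int) : Prop := out = max_depth_from_root_rf2_alt concept_id child_to_parents root_id memo stack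
instance (concept_id : String) (child_to_parents : List (String × List String)) (root_id : String) (memo : Option (List (String × Option Int))) (stack : Option (List String)) (out : Option Int) : Decidable (Spec_max_depth_from_root_rf2 concept_id child_to_parents root_id memo stack out) := by unfold Spec_max_depth_from_root_rf2; infer_instance

-- ===== CLAIM (what is proved, stated in full; the proofs are below) =====
def Claim_equal_max_depth_from_root_rf2 : Prop := ∀ (concept_id : String) (child_to_parents : List (String × List String)) (root_id : String) (memo : Option (List (String × Option Int))) (stack : Option (List String)), Dom_max_depth_from_root_rf2 concept_id child_to_parents root_id memo stack → Spec_max_depth_from_root_rf2 concept_id child_to_parents root_id memo stack (max_depth_from_root_rf2 concept_id child_to_parents root_id memo stack)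

-- ===== LEMMAS AND PROOFS =====

theorem pvKeysLeft_le_length (ctp : List (String × List String)) (memo : PySem.Dict String (Option Int)) (vis : List String) :
    pvKeysLeft ctp memo vis ≤ ctp.length := by
  unfold pvKeysLeft
  calc _ ≤ (ctp.map Prod.fst).toFinset.card := Finset.card_filter_le _ _
    _ ≤ (ctp.map Prod.fst).length := List.toFinset_card_le _
    _ = ctp.length := List.length_map ..

-- memo keys only grow through A's recursion
theorem pvFold_memo_of_goA (ctp : List (String × List String)) (root : String) (f : Nat)
    (hP : ∀ c memo vis k, PySem.Dict.get? (pvGoA ctp root f c memo vis).2.1 k = none → PySem.Dict.get? memo k = none) :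
    ∀ (ps : List String) (acc : Option Int × PySem.Dict String (Option Int) × List String) (k : String),
      PySem.Dict.get? (pvFoldA ctp root f ps acc).2.1 k = none → PySem.Dict.get? acc.2.1 k = none := by
  intro ps
  induction ps with
  | nil => intro acc k h; simpa [pvFoldA] using h
  | cons q qs ih =>
    intro acc k h
    rw [pvFoldA] at h
    exact hP q acc.2.1 acc.2.2 k
      (ih (pvUpd acc.1 (pvGoA ctp root f q acc.2.1 acc.2.2).1, (pvGoA ctp root f q acc.2.1 acc.2.2).2.1,
        (pvGoA ctp root f q acc.2.1 acc.2.2).2.2) k h)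

theorem pvGoA_memo_none (ctp : List (String × List String)) (root : String) :
    ∀ (f : Nat) (c : String) (memo : PySem.Dict String (Option Int)) (vis : List String) (k : String),
      PySem.Dict.get? (pvGoA ctp root f c memo vis).2.1 k = none → PySem.Dict.get? memo k = none := by
  intro f
  induction f with
  | zero => intro c memo vis k h; simpa [pvGoA] using h
  | succ f ih =>
    intro c memo vis k h
    have hfold := pvFold_memo_of_goA ctp root f ih
    by_cases hr : c = root
    · simpa [pvGoA, hr] using h
    · cases hm : PySem.Dict.get? memo c with
      | some v => simpa [pvGoA, hr, hm] using h
      | none =>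
        by_cases hv : PySem.Set.contains vis c
        · have hmem : c ∈ vis := (PySem.Set.contains_iff vis c).1 hv
          simp [pvGoA, hr, hm, hmem] at h
          rw [PySem.Dict.get?_insert] at h
          split at h
          · exact absurd h (by simp)
          · exact h
        · have hnmem : c ∉ vis := fun hmem => hv ((PySem.Set.contains_iff vis c).2 hmem)
          cases hc : PySem.Dict.get? (PySem.Dict.mk ctp) c with
          | none =>
            simp [pvGoA, hr, hm, hnmem, hc] at h
            rw [PySem.Dict.get?_insert] at h
            split at h
            · exact absurd h (by simp)
            · exact h
          | some ps =>
            cases ps with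
            | nil =>
              simp [pvGoA, hr, hm, hnmem, hc] at h
              rw [PySem.Dict.get?_insert] at h
              split at h
              · exact absurd h (by simp)
              · exact h
            | cons p ps' =>
              simp [pvGoA, hr, hm, hnmem, hc] at h
              rw [PySem.Dict.get?_insert] at h
              split at h
              · exact absurd h (by simp)
              · exact hfold (p :: ps') (none, memo, vis ++ [c]) k h

-- the visiting set is restored by A's recursion (add then discard)
theorem pvFold_vis_of_goA (ctp : List (String × List String)) (root : String) (f : Nat)
    (hP : ∀ c memo vis k, k ∈ (pvGoA ctp root f c memo vis).2.2 ↔ k ∈ vis) :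
    ∀ (ps : List String) (acc : Option Int × PySem.Dict String (Option Int) × List String) (k : String),
      k ∈ (pvFoldA ctp root f ps acc).2.2 ↔ k ∈ acc.2.2 := by
  intro ps
  induction ps with
  | nil => intro acc k; simp [pvFoldA]
  | cons q qs ih =>
    intro acc k
    rw [pvFoldA]
    exact (ih (pvUpd acc.1 (pvGoA ctp root f q acc.2.1 acc.2.2).1, (pvGoA ctp root f q acc.2.1 acc.2.2).2.1,
      (pvGoA ctp root f q acc.2.1 acc.2.2).2.2) k).trans (hP q acc.2.1 acc.2.2 k)

theorem pvGoA_vis (ctp : List (String × List String)) (root : String) :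
    ∀ (f : Nat) (c : String) (memo : PySem.Dict String (Option Int)) (vis : List String) (k : String),
      k ∈ (pvGoA ctp root f c memo vis).2.2 ↔ k ∈ vis := by
  intro f
  induction f with
  | zero => intro c memo vis k; simp [pvGoA]
  | succ f ih =>
    intro c memo vis k
    have hfold := pvFold_vis_of_goA ctp root f ih
    by_cases hr : c = root
    · simp [pvGoA, hr]
    · cases hm : PySem.Dict.get? memo c with
      | some v => simp [pvGoA, hr, hm]
      | none =>
        by_cases hv : PySem.Set.contains vis c
        · have hmem : c ∈ vis := (PySem.Set.contains_iff vis c).1 hv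
          simp [pvGoA, hr, hm, hmem]
        · have hcnot : c ∉ vis := fun hmem => hv ((PySem.Set.contains_iff vis c).2 hmem)
          cases hc : PySem.Dict.get? (PySem.Dict.mk ctp) c with
          | none => simp [pvGoA, hr, hm, hcnot, hc]
          | some ps =>
            cases ps with
            | nil => simp [pvGoA, hr, hm, hcnot, hc]
            | cons p ps' =>
              have hbody : (pvGoA ctp root (f+1) c memo vis).2.2
                  = PySem.Set.discard (pvFoldA ctp root f (p :: ps') (none, memo, PySem.Set.add vis c)).2.2 c := by
                conv_lhs => rw [pvGoA]
                simp [hr, hm, hcnot, hc]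
              rw [hbody, PySem.Set.mem_discard,
                hfold (p :: ps') ((none : Option Int), memo, PySem.Set.add vis c) k]
              show (k ∈ PySem.Set.add vis c ∧ k ≠ c) ↔ k ∈ vis
              rw [PySem.Set.mem_add]
              constructor
              · rintro ⟨h1 | h1, h2⟩
                · exact h1
                · exact absurd h1 h2
              · intro hk
                refine ⟨Or.inl hk, fun he => ?_⟩
                exact hcnot (he ▸ hk)

theorem pvKeysLeft_reentry_lt (ctp : List (String × List String)) (memo : PySem.Dict String (Option Int)) (vis : List String)
    (p : String) (m' : PySem.Dict String (Option Int)) (v' : List String) (b : Option Int)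
    (hkey : p ∈ ctp.map Prod.fst) (hm : PySem.Dict.get? memo p = none) (hv : p ∉ vis)
    (hmono : ∀ k, PySem.Dict.get? m' k = none → PySem.Dict.get? memo k = none)
    (hvis : ∀ k, k ∈ v' ↔ k ∈ PySem.Set.add vis p) :
    pvKeysLeft ctp (m'.insert p b) (PySem.Set.discard v' p) < pvKeysLeft ctp memo vis := by
  unfold pvKeysLeft
  apply Finset.card_lt_card
  constructor
  · intro k hk
    rw [Finset.mem_filter] at hk ⊢
    obtain ⟨hk1, hk2, hk3⟩ := hk
    rw [PySem.Dict.get?_insert] at hk2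
    split at hk2
    · exact absurd hk2 (by simp)
    · rename_i hne
      refine ⟨hk1, hmono k hk2, fun hkv => hk3 ?_⟩
      rw [PySem.Set.mem_discard, hvis k, PySem.Set.mem_add]
      exact ⟨Or.inl hkv, hne⟩
  · intro hsup
    have hp : p ∈ (ctp.map Prod.fst).toFinset.filter (fun k => PySem.Dict.get? memo k = none ∧ k ∉ vis) := by
      rw [Finset.mem_filter]
      exact ⟨List.mem_toFinset.2 hkey, hm, hv⟩
    have := Finset.mem_filter.1 (hsup hp)
    rw [PySem.Dict.get?_insert] at this
    simp at this

-- the simulation relation: one machine frame computes A's parent loop from its accumulator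
def pvSimEq (ctp : List (String × List String)) (root : String) (node : String) (pending : List String) (best : Option Int)
    (rest : List (String × List String × Option Int)) (memo : PySem.Dict String (Option Int)) (vis : List String) (f : Nat) : Prop :=
  pvRunB ctp root ((node, pending, best) :: rest) memo vis =
    (if rest.isEmpty then (pvFoldA ctp root f pending (best, memo, vis)).1
     else pvRunB ctp root rest ((pvFoldA ctp root f pending (best, memo, vis)).2.1.insert node (pvFoldA ctp root f pending (best, memo, vis)).1)
            (PySem.Set.discard (pvFoldA ctp root f pending (best, memo, vis)).2.2 node))

theorem pvSimCore (ctp : List (String × List String)) (root : String) (node : String) (pending : List String) (best : Option Int)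
    (rest : List (String × List String × Option Int)) (memo : PySem.Dict String (Option Int)) (vis : List String) (f : Nat)
    (hf : pvKeysLeft ctp memo vis < f)
    (IHa : ∀ node' pending' best' rest' memo' vis' f', pvKeysLeft ctp memo' vis' < pvKeysLeft ctp memo vis →
      pvKeysLeft ctp memo' vis' < f' → pvSimEq ctp root node' pending' best' rest' memo' vis' f')
    (IHb : ∀ node' pending' best' rest' memo' vis' f', pvKeysLeft ctp memo' vis' ≤ pvKeysLeft ctp memo vis →
      pvKeysLeft ctp memo' vis' < f' → pvSumLen ((node', pending', best') :: rest') < pvSumLen ((node, pending, best) :: rest) →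
      pvSimEq ctp root node' pending' best' rest' memo' vis' f') :
    pvSimEq ctp root node pending best rest memo vis f := by
  obtain ⟨f0, rfl⟩ : ∃ f0, f = f0 + 1 := ⟨f - 1, by omega⟩
  unfold pvSimEq
  cases pending with
  | nil =>
    rw [pvRunB.eq_def]
    cases rest with
    | nil => simp [pvFoldA]
    | cons r rs => simp [pvFoldA]
  | cons p restP =>
    by_cases hr : p = root
    · have hstep : pvRunB ctp root ((node, p :: restP, best) :: rest) memo vis
          = pvRunB ctp root ((node, restP, pvUpd best (some 0)) :: rest) memo vis := by
        rw [pvRunB.eq_def]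
        simp [hr]
      have hfold : pvFoldA ctp root (f0+1) (p :: restP) (best, memo, vis)
          = pvFoldA ctp root (f0+1) restP (pvUpd best (some 0), memo, vis) := by
        rw [pvFoldA]; simp [pvGoA, hr]
      have h := IHb node restP (pvUpd best (some 0)) rest memo vis (f0+1) le_rfl hf
        (by simp [pvSumLen]; try omega)
      unfold pvSimEq at h
      rw [hstep, h, hfold]
    · cases hm : PySem.Dict.get? memo p with
      | some v =>
        have hstep : pvRunB ctp root ((node, p :: restP, best) :: rest) memo vis
            = pvRunB ctp root ((node, restP, pvUpd best v) :: rest) memo vis := by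
          rw [pvRunB.eq_def]
          simp [hr, hm]
          try (split <;> simp_all)
        have hfold : pvFoldA ctp root (f0+1) (p :: restP) (best, memo, vis)
            = pvFoldA ctp root (f0+1) restP (pvUpd best v, memo, vis) := by
          rw [pvFoldA]; simp [pvGoA, hr, hm]
        have h := IHb node restP (pvUpd best v) rest memo vis (f0+1) le_rfl hf
          (by simp [pvSumLen]; try omega)
        unfold pvSimEq at h
        rw [hstep, h, hfold]
      | none =>
        by_cases hv : PySem.Set.contains vis p
        · have hmem : p ∈ vis := (PySem.Set.contains_iff vis p).1 hv
          have hstep : pvRunB ctp root ((node, p :: restP, best) :: rest) memo vis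
              = pvRunB ctp root ((node, restP, best) :: rest) (memo.insert p none) vis := by
            rw [pvRunB.eq_def]
            simp [hr, hm, hv]
            try (split <;> simp_all)
          have hfold : pvFoldA ctp root (f0+1) (p :: restP) (best, memo, vis)
              = pvFoldA ctp root (f0+1) restP (best, memo.insert p none, vis) := by
            rw [pvFoldA]; simp [pvGoA, hr, hm, hmem, pvUpd]
          have hle := pvKeysLeft_insert_le ctp memo vis p none
          have h := IHb node restP best rest (memo.insert p none) vis (f0+1) hle (by omega)
            (by simp [pvSumLen]; try omega)
          unfold pvSimEq at h
          rw [hstep, h, hfold]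
        · have hnmem : p ∉ vis := fun hmem => hv ((PySem.Set.contains_iff vis p).2 hmem)
          cases hc : PySem.Dict.get? (PySem.Dict.mk ctp) p with
          | none =>
            have hstep : pvRunB ctp root ((node, p :: restP, best) :: rest) memo vis
                = pvRunB ctp root ((node, restP, best) :: rest) (memo.insert p none) vis := by
              rw [pvRunB.eq_def]
              simp [hr, hm, hv, hc]
              try (split <;> simp_all)
              try (split <;> simp_all)
            have hfold : pvFoldA ctp root (f0+1) (p :: restP) (best, memo, vis)
                = pvFoldA ctp root (f0+1) restP (best, memo.insert p none, vis) := by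
              rw [pvFoldA]; simp [pvGoA, hr, hm, hnmem, hc, pvUpd]
            have hle := pvKeysLeft_insert_le ctp memo vis p none
            have h := IHb node restP best rest (memo.insert p none) vis (f0+1) hle (by omega)
              (by simp [pvSumLen]; try omega)
            unfold pvSimEq at h
            rw [hstep, h, hfold]
          | some ps =>
            cases ps with
            | nil =>
              have hstep : pvRunB ctp root ((node, p :: restP, best) :: rest) memo vis
                  = pvRunB ctp root ((node, restP, best) :: rest) (memo.insert p none) vis := by
                rw [pvRunB.eq_def]
                simp [hr, hm, hv, hc]
                try (split <;> simp_all)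
                try (split <;> simp_all)
              have hfold : pvFoldA ctp root (f0+1) (p :: restP) (best, memo, vis)
                  = pvFoldA ctp root (f0+1) restP (best, memo.insert p none, vis) := by
                rw [pvFoldA]; simp [pvGoA, hr, hm, hnmem, hc, pvUpd]
              have hle := pvKeysLeft_insert_le ctp memo vis p none
              have h := IHb node restP best rest (memo.insert p none) vis (f0+1) hle (by omega)
                (by simp [pvSumLen]; try omega)
              unfold pvSimEq at h
              rw [hstep, h, hfold]
            | cons q qs =>
              -- push case
              have hkey : p ∈ ctp.map Prod.fst := by
                have hne : ¬ PySem.Dict.get? (PySem.Dict.mk ctp) p = none := by simp [hc]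
                rw [PySem.Dict.get?_eq_none_iff_not_mem_keys] at hne
                simpa [PySem.Dict.keys] using not_not.1 hne
              have hlt1 : pvKeysLeft ctp memo (PySem.Set.add vis p) < pvKeysLeft ctp memo vis :=
                pvKeysLeft_add_lt ctp memo vis p hkey hm hnmem
              have hstep : pvRunB ctp root ((node, p :: restP, best) :: rest) memo vis
                  = pvRunB ctp root ((p, q :: qs, none) :: (node, p :: restP, best) :: rest) memo (PySem.Set.add vis p) := by
                rw [pvRunB.eq_def]
                simp [hr, hm, hv, hc]
                try (split <;> simp_all)
                try (split <;> simp_all)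
              have h1 := IHa p (q :: qs) none ((node, p :: restP, best) :: rest) memo (PySem.Set.add vis p) f0 hlt1 (by omega)
              unfold pvSimEq at h1
              rw [List.isEmpty_cons] at h1
              simp only [Bool.false_eq_true, if_false] at h1
              have hmono := pvFold_memo_of_goA ctp root f0 (pvGoA_memo_none ctp root f0)
              have hvis := pvFold_vis_of_goA ctp root f0 (pvGoA_vis ctp root f0)
              set st := pvFoldA ctp root f0 (q :: qs) (none, memo, PySem.Set.add vis p) with hst
              have hlt2 : pvKeysLeft ctp (st.2.1.insert p st.1) (PySem.Set.discard st.2.2 p) < pvKeysLeft ctp memo vis :=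
                pvKeysLeft_reentry_lt ctp memo vis p st.2.1 st.2.2 st.1 hkey hm hnmem
                  (fun k hk => hmono (q :: qs) (none, memo, PySem.Set.add vis p) k hk)
                  (fun k => hvis (q :: qs) (none, memo, PySem.Set.add vis p) k)
              have h2 := IHa node (p :: restP) best rest (st.2.1.insert p st.1) (PySem.Set.discard st.2.2 p) (f0+1) hlt2 (by omega)
              unfold pvSimEq at h2
              have hgoA : pvGoA ctp root (f0+1) p memo vis = (st.1, st.2.1.insert p st.1, PySem.Set.discard st.2.2 p) := by
                conv_lhs => rw [pvGoA.eq_def]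
                simp [hr, hm, hnmem, hc]
                rw [hst, PySem.Set.add_of_not_mem hnmem]
                exact ⟨rfl, rfl, rfl⟩
              have hgoA2 : pvGoA ctp root (f0+1) p (st.2.1.insert p st.1) (PySem.Set.discard st.2.2 p)
                  = (st.1, st.2.1.insert p st.1, PySem.Set.discard st.2.2 p) := by
                have hself : PySem.Dict.get? (st.2.1.insert p st.1) p = some st.1 :=
                  PySem.Dict.get?_insert_self st.2.1 p st.1
                conv_lhs => rw [pvGoA.eq_def]
                simp [hr, hself]
              have hfold1 : pvFoldA ctp root (f0+1) (p :: restP) (best, memo, vis)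
                  = pvFoldA ctp root (f0+1) restP (pvUpd best st.1, st.2.1.insert p st.1, PySem.Set.discard st.2.2 p) := by
                rw [pvFoldA]
                have : (best, memo, vis).2.1 = memo := rfl
                simp only [hgoA]
              have hfold2 : pvFoldA ctp root (f0+1) (p :: restP) (best, st.2.1.insert p st.1, PySem.Set.discard st.2.2 p)
                  = pvFoldA ctp root (f0+1) restP (pvUpd best st.1, st.2.1.insert p st.1, PySem.Set.discard st.2.2 p) := by
                rw [pvFoldA]
                simp only [hgoA2]
              rw [hstep, h1, h2, hfold2, hfold1]

theorem pvSim (ctp : List (String × List String)) (root : String) :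
    ∀ (a : Nat), ∀ (b : Nat), ∀ (node : String) (pending : List String) (best : Option Int)
      (rest : List (String × List String × Option Int)) (memo : PySem.Dict String (Option Int)) (vis : List String) (f : Nat),
      pvKeysLeft ctp memo vis ≤ a → pvSumLen ((node, pending, best) :: rest) ≤ b → pvKeysLeft ctp memo vis < f →
      pvSimEq ctp root node pending best rest memo vis f := by
  intro a
  induction a with
  | zero =>
    intro b
    induction b with
    | zero =>
      intro node pending best rest memo vis f ha hb hf
      exact absurd hb (by simp [pvSumLen]; try omega)
    | succ b ihb =>
      intro node pending best rest memo vis f ha hb hf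
      apply pvSimCore ctp root node pending best rest memo vis f hf
      · intro n' p' b' r' m' v' f' hlt hf'
        exact absurd (lt_of_lt_of_le hlt ha) (Nat.not_lt_zero _)
      · intro n' p' b' r' m' v' f' hle hf' hsum
        exact ihb n' p' b' r' m' v' f' (le_trans hle ha) (by omega) hf'
  | succ a iha =>
    intro b
    induction b with
    | zero =>
      intro node pending best rest memo vis f ha hb hf
      exact absurd hb (by simp [pvSumLen]; try omega)
    | succ b ihb =>
      intro node pending best rest memo vis f ha hb hf
      apply pvSimCore ctp root node pending best rest memo vis f hf
      · intro n' p' b' r' m' v' f' hlt hf'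
        exact iha (pvSumLen ((n', p', b') :: r')) n' p' b' r' m' v' f' (by omega) le_rfl hf'
      · intro n' p' b' r' m' v' f' hle hf' hsum
        exact ihb n' p' b' r' m' v' f' (le_trans hle ha) (by omega) hf'

-- ===== VERDICT (by name: the statement is the Claim_ definition above) =====
theorem max_depth_from_root_rf2_spec : Claim_equal_max_depth_from_root_rf2 := by
  intro c ctp root memo stack _
  unfold Spec_max_depth_from_root_rf2
  unfold max_depth_from_root_rf2 max_depth_from_root_rf2_alt
  set memo0 : PySem.Dict String (Option Int) := PySem.Dict.mk (memo.getD []) with hmemo0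
  set vis0 : List String := stack.getD [] with hvis0
  by_cases hr : c = root
  · simp [pvGoA, hr]
  · cases hm : PySem.Dict.get? memo0 c with
    | some v => simp [pvGoA, hr, hm]
    | none =>
      by_cases hv : PySem.Set.contains vis0 c
      · have hmem : c ∈ vis0 := (PySem.Set.contains_iff vis0 c).1 hv
        simp [pvGoA, hr, hm, hmem]
      · have hnmem : c ∉ vis0 := fun hmem => hv ((PySem.Set.contains_iff vis0 c).2 hmem)
        cases hc : PySem.Dict.get? (PySem.Dict.mk ctp) c with
        | none => simp [pvGoA, hr, hm, hnmem, hc]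
        | some ps =>
          cases ps with
          | nil => simp [pvGoA, hr, hm, hnmem, hc]
          | cons p ps' =>
            have hflt : pvKeysLeft ctp memo0 (PySem.Set.add vis0 c) < ctp.length + 1 :=
              lt_of_le_of_lt (pvKeysLeft_le_length ctp memo0 (PySem.Set.add vis0 c)) (by omega)
            have hsim := pvSim ctp root (pvKeysLeft ctp memo0 (PySem.Set.add vis0 c))
              (pvSumLen [(c, p :: ps', none)]) c (p :: ps') none [] memo0 (PySem.Set.add vis0 c)
              (ctp.length + 1) le_rfl le_rfl hflt
            unfold pvSimEq at hsim
            simp only [List.isEmpty_nil, if_true] at hsim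
            simp [pvGoA, hr, hm, hnmem, hc]
            rw [PySem.Set.add_of_not_mem hnmem] at hsim
            exact hsim.symm
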